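-- pv_equiv track=rewrite | github.com/SwaggyCloud/data-mining | hw1.py | combaine
-- ===== SOURCE A (Python) =====
-- def combaine(keys1):
--     keys2 = []
--     for k1 in keys1:
--         for k2 in keys1:
--             if k1 != k2:
--                 key = []
--                 for k in k1:
--                     if k not in key:
--                         key.append(k)
--                 for k in k2:
--                     if k not in key:
--                         key.append(k)
--                 key.sort()
--                 if key not in keys2:
--                     keys2.append(key)
--     return keys2
-- ===== SOURCE B (Python) =====
-- def combaine(keys1):
--     # Prepare, once per element, its sorted deduplicated form (sort + adjacent dedup),
--     # then build each pair's key with a two-pointer merge instead of dedup + sort.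
--     def sorted_unique(e):
--         s = sorted(e)
--         out = []
--         for v in s:
--             if not out or out[-1] != v:
--                 out.append(v)
--         return out
--
--     def merge_unique(xs, ys):
--         out = []
--         i, j = 0, 0
--         while i < len(xs) and j < len(ys):
--             if xs[i] < ys[j]:
--                 out.append(xs[i]); i += 1
--             elif ys[j] < xs[i]:
--                 out.append(ys[j]); j += 1
--             else:
--                 out.append(xs[i]); i += 1; j += 1
--         out.extend(xs[i:])
--         out.extend(ys[j:])
--         return out
--
--     prep = [(k, sorted_unique(k)) for k in keys1]
--     keys2 = []
--     for a, sa in prep: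
--         for b, sb in prep:
--             if a != b:
--                 key = merge_unique(sa, sb)
--                 if key not in keys2:
--                     keys2.append(key)
--     return keys2
-- ===== Notes on version B (the rewrite author's own statement) =====
-- stated objective: alternative
-- what changed: B computes each element's sorted deduplicated form once (sort + adjacent dedup) and builds each pair's key with a two-pointer merge, instead of A's per-pair membership-based dedup followed by a sort; intended as faster inner work, measured about 4x at n=4096 but unconfirmed at the largest size.
import Mathlib
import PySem

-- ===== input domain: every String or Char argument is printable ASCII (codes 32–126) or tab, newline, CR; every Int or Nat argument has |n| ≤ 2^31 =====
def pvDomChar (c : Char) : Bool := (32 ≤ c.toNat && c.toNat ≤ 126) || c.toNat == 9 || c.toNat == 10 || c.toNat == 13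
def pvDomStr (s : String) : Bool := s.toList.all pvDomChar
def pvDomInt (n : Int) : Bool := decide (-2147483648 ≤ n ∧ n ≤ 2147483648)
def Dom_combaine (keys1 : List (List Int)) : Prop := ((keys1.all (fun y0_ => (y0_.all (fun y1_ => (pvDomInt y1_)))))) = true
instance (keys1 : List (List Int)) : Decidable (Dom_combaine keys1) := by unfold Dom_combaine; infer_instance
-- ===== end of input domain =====

-- B replaces A's per-pair membership-dedup-then-sort by one sorted-unique pass per element
-- plus a two-pointer merge per pair (objective: alternative algorithm, same outputs).

-- ===== PORT A =====
def combaine (keys1 : List (List Int)) : List (List Int) :=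
  List.foldl (fun keys2 k1 =>
    List.foldl (fun keys2 k2 =>
      if k1 ≠ k2 then
        -- key = []; for k in k1: if k not in key: key.append(k); same for k2
        let key := List.foldl (fun key k => if k ∈ key then key else key ++ [k])
          (List.foldl (fun key k => if k ∈ key then key else key ++ [k]) [] k1) k2
        let key := PySem.List.sorted key (fun x => x) false
        if key ∈ keys2 then keys2 else keys2 ++ [key]
      else keys2) keys2 keys1) [] keys1

-- ===== PORT B =====
-- sorted_unique: s = sorted(e); append v when out is empty or out[-1] != v
def pvSU (e : List Int) : List Int :=
  List.foldl (fun out v => if out.getLast? = some v then out else out ++ [v])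
    [] (PySem.List.sorted e (fun x => x) false)

-- merge_unique: two-pointer merge of two lists, emitting a common value once
def pvMerge : List Int → List Int → List Int
  | [], ys => ys
  | xs, [] => xs
  | x :: xs, y :: ys =>
    if x < y then x :: pvMerge xs (y :: ys)
    else if y < x then y :: pvMerge (x :: xs) ys
    else x :: pvMerge xs ys
termination_by xs ys => xs.length + ys.length

def combaine_alt (keys1 : List (List Int)) : List (List Int) :=
  let prep := keys1.map (fun k => (k, pvSU k))
  List.foldl (fun keys2 p =>
    List.foldl (fun keys2 q =>
      if p.1 ≠ q.1 then
        let key := pvMerge p.2 q.2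
        if key ∈ keys2 then keys2 else keys2 ++ [key]
      else keys2) keys2 prep) [] prep

-- ===== PRECONDITION & SPEC =====
def Spec_combaine (keys1 : List (List Int)) (out : List (List Int)) : Prop := out = combaine_alt keys1
instance (keys1 : List (List Int)) (out : List (List Int)) : Decidable (Spec_combaine keys1 out) := by unfold Spec_combaine; infer_instance

-- ===== CLAIM (what is proved, stated in full; the proofs are below) =====
def Claim_equal_combaine : Prop := ∀ (keys1 : List (List Int)), Dom_combaine keys1 → Spec_combaine keys1 (combaine keys1)

-- ===== LEMMAS AND PROOFS =====

-- A's dedup step is PySem.Set.add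
lemma dedup_step_eq : (fun (key : List Int) k => if k ∈ key then key else key ++ [k]) = PySem.Set.add := by
  funext key k
  simp [PySem.Set.add]

-- the sorted-unique fold: invariant over the accumulator
lemma su_fold_inv (s : List Int) : ∀ acc : List Int,
    (acc ++ s).Pairwise (· ≤ ·) → acc.Pairwise (· < ·) →
    (List.foldl (fun out v => if out.getLast? = some v then out else out ++ [v]) acc s).Pairwise (· < ·) ∧
    ∀ z, z ∈ List.foldl (fun out v => if out.getLast? = some v then out else out ++ [v]) acc s ↔ z ∈ acc ∨ z ∈ s := by
  induction s with
  | nil => intro acc _ h2; simpa using h2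
  | cons v s ih =>
    intro acc h1 h2
    by_cases hv : acc.getLast? = some v
    · have hvmem : v ∈ acc := by
        rcases List.getLast?_eq_some_iff.mp hv with ⟨l, rfl⟩
        simp
      have h1' : (acc ++ s).Pairwise (· ≤ ·) :=
        List.Pairwise.sublist ((List.sublist_cons_self v s).append_left acc) h1
      have := ih acc h1' h2
      rw [List.foldl_cons, if_pos hv]
      refine ⟨this.1, fun z => ?_⟩
      rw [this.2 z]
      constructor
      · rintro (h | h) <;> simp [h]
      · rintro (h | h)
        · exact Or.inl h
        · rcases List.mem_cons.mp h with rfl | h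
          · exact Or.inl hvmem
          · exact Or.inr h
    · have hle : ∀ a ∈ acc, a ≤ v := by
        intro a ha
        have := (List.pairwise_append.mp h1).2.2 a ha v (by simp)
        exact this
      have hlt : ∀ a ∈ acc, a < v := by
        intro a ha
        rcases List.eq_nil_or_concat acc with rfl | ⟨l, b, hacc⟩
        · simp at ha
        · rw [List.concat_eq_append] at hacc
          subst hacc
          have hb : b ≠ v := by
            intro h; apply hv; simp [h]
          have hbv : b < v := lt_of_le_of_ne (hle b (by simp)) hb
          rcases List.mem_append.mp ha with ha' | ha'
          · have : a < b := (List.pairwise_append.mp h2).2.2 a ha' b (by simp)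
            exact this.trans hbv
          · simp at ha'; subst ha'; exact hbv
      have h1' : ((acc ++ [v]) ++ s).Pairwise (· ≤ ·) := by
        rw [List.append_assoc]; simpa using h1
      have h2' : (acc ++ [v]).Pairwise (· < ·) := by
        rw [List.pairwise_append]
        exact ⟨h2, List.pairwise_singleton _ _, by intro a ha b hb; simp at hb; subst hb; exact hlt a ha⟩
      have := ih (acc ++ [v]) h1' h2'
      rw [List.foldl_cons, if_neg hv]
      refine ⟨this.1, fun z => ?_⟩
      rw [this.2 z]
      simp only [List.mem_append, List.mem_cons]
      tauto

lemma su_pairwise (e : List Int) : (pvSU e).Pairwise (· < ·) :=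
  (su_fold_inv _ [] (by simpa using PySem.List.sorted_pairwise (xs := e) (key := fun x => x)) (by simp)).1

lemma mem_su (e : List Int) : ∀ z, z ∈ pvSU e ↔ z ∈ e := by
  intro z
  have := (su_fold_inv _ [] (by simpa using PySem.List.sorted_pairwise (xs := e) (key := fun x => x)) (by simp)).2 z
  unfold pvSU
  rw [this]
  simp [PySem.List.mem_sorted]

lemma mem_merge (xs ys : List Int) : ∀ z, z ∈ pvMerge xs ys ↔ z ∈ xs ∨ z ∈ ys := by
  intro z
  induction xs, ys using pvMerge.induct with
  | case1 ys => simp [pvMerge]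
  | case2 xs h => cases xs <;> simp_all [pvMerge]
  | case3 x xs y ys h ih => rw [pvMerge]; simp_all; tauto
  | case4 x xs y ys h h' ih => rw [pvMerge]; simp_all [if_neg h]; tauto
  | case5 x xs y ys h h' ih =>
    have hxy : x = y := le_antisymm (not_lt.mp h') (not_lt.mp h)
    rw [pvMerge]; simp [ih, hxy]
    tauto

lemma merge_pairwise (xs ys : List Int) (hx : xs.Pairwise (· < ·)) (hy : ys.Pairwise (· < ·)) :
    (pvMerge xs ys).Pairwise (· < ·) := by
  induction xs, ys using pvMerge.induct with
  | case1 ys => simpa [pvMerge] using hy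
  | case2 xs h => cases xs <;> simp_all [pvMerge]
  | case3 x xs y ys h ih =>
    rw [pvMerge, if_pos h]
    rw [List.pairwise_cons] at hx ⊢
    refine ⟨?_, ih hx.2 hy⟩
    intro a ha
    rcases (mem_merge _ _ a).mp ha with ha' | ha'
    · exact hx.1 a ha'
    · rcases List.mem_cons.mp ha' with rfl | ha''
      · exact h
      · exact h.trans ((List.pairwise_cons.mp hy).1 a ha'')
  | case4 x xs y ys h h' ih =>
    rw [pvMerge, if_neg h, if_pos h']
    rw [List.pairwise_cons] at hy ⊢
    refine ⟨?_, ih hx hy.2⟩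
    intro a ha
    rcases (mem_merge _ _ a).mp ha with ha' | ha'
    · rcases List.mem_cons.mp ha' with rfl | ha''
      · exact h'
      · exact h'.trans ((List.pairwise_cons.mp hx).1 a ha'')
    · exact hy.1 a ha'
  | case5 x xs y ys h h' ih =>
    have hxy : x = y := le_antisymm (not_lt.mp h') (not_lt.mp h)
    rw [pvMerge, if_neg h, if_neg h']
    rw [List.pairwise_cons] at hx hy ⊢
    refine ⟨?_, ih hx.2 hy.2⟩
    intro a ha
    rcases (mem_merge _ _ a).mp ha with ha' | ha'
    · exact hx.1 a ha'
    · exact hxy ▸ hy.1 a ha'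

-- the per-pair values of A and B coincide
lemma key_eq (k1 k2 : List Int) :
    PySem.List.sorted
      (List.foldl (fun key k => if k ∈ key then key else key ++ [k])
        (List.foldl (fun key k => if k ∈ key then key else key ++ [k]) [] k1) k2)
      (fun x => x) false = pvMerge (pvSU k1) (pvSU k2) := by
  rw [dedup_step_eq, ← List.foldl_append]
  have hded : List.foldl PySem.Set.add [] (k1 ++ k2) = PySem.Set.ofList (k1 ++ k2) := rfl
  rw [hded]
  have hpw : (pvMerge (pvSU k1) (pvSU k2)).Pairwise (· < ·) :=
    merge_pairwise _ _ (su_pairwise k1) (su_pairwise k2)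
  have hmem : ∀ z, z ∈ pvMerge (pvSU k1) (pvSU k2) ↔ z ∈ PySem.Set.ofList (k1 ++ k2) := by
    intro z
    rw [mem_merge, mem_su, mem_su, PySem.Set.mem_ofList]
    simp
  have hperm : (pvMerge (pvSU k1) (pvSU k2)).Perm (PySem.Set.ofList (k1 ++ k2)) :=
    (List.perm_ext_iff_of_nodup hpw.nodup (PySem.Set.nodup_ofList _)).mpr hmem
  exact PySem.List.sorted_eq_of_perm_of_pairwise_lt _ _ _ hperm hpw

-- ===== VERDICT (by name: the statement is the Claim_ definition above) =====
theorem combaine_spec : Claim_equal_combaine := by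
  intro keys1 _
  unfold Spec_combaine combaine combaine_alt
  simp only [List.foldl_map]
  congr 1
  funext keys2 k1
  congr 1
  funext keys2' k2
  simp only [key_eq]
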